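-- pv_equiv track=rewrite | github.com/minh-tech/Bitwise-Algorithms | Basic/Prob_27-findSumBy2BitsNum.py | findSumBy2BitsNum
-- ===== SOURCE A (Python) =====
-- def findSumBy2BitsNum(n):
-- 	num1 = 1
-- 	sum_ = 0
-- 	while num1 < n:
-- 		num1 = num1 << 1
-- 		num2 = 1
-- 		while (num1 | num2) <= n and num1 != num2:
-- 			sum_ = sum_ + (num1 | num2)
-- 			num2 = num2 << 1
-- 	return sum_
-- ===== SOURCE B (Python) =====
-- def findSumBy2BitsNum(n):
--     # For each high bit position i, count the valid low bits in closed form: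
--     # numbers 2^i + 2^j (j < i) are <= n exactly for j < c where
--     # c = min(i, (n - 2^i).bit_length()); their sum is c*2^i + (2^c - 1).
--     total = 0
--     i = 1
--     while (1 << i) + 1 <= n:
--         c = min(i, (n - (1 << i)).bit_length())
--         total += c * (1 << i) + ((1 << c) - 1)
--         i += 1
--     return total
-- ===== Notes on version B (the rewrite author's own statement) =====
-- stated objective: alternative
-- what changed: A's nested while loops (doubling num1 and num2 and OR-ing them) are replaced by a single loop over the high bit position i that adds the whole inner sum in closed form: c*2^i + (2^c - 1) with c = min(i, (n - 2^i).bit_length()).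
import Mathlib
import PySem

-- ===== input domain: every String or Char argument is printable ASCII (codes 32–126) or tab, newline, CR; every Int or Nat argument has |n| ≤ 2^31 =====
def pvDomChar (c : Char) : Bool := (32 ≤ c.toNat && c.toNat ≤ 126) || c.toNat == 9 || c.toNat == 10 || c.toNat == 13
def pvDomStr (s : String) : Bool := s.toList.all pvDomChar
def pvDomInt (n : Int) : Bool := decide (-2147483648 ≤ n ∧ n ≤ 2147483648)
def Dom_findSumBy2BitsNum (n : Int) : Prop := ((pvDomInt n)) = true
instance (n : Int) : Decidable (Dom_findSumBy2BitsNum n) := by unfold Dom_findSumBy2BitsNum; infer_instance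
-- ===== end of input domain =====

-- B replaces A's nested shifting loops by a single loop over the high bit position,
-- computing each inner sum in closed form (objective: alternative/simpler inner structure).


-- ===== PORT A =====
-- inner while loop of A; num1, num2, sum_ are always nonnegative ints in Python, kept as Nat
-- (the hypothesis argument 0 < num2 only serves termination; it is invariant in A's run)
def innerA (n : Int) (num1 num2 s : Nat) (hp : 0 < num2) : Nat :=
  if h : ((num1 ||| num2 : Nat) : Int) ≤ n ∧ num1 ≠ num2 then
    innerA n num1 (num2 <<< 1) (s + (num1 ||| num2)) (by simp [Nat.shiftLeft_eq]; omega)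
  else s
  termination_by n.toNat + 1 - num2
  decreasing_by
    have h1 : num2 ≤ num1 ||| num2 := Nat.right_le_or
    simp only [Nat.shiftLeft_eq, pow_one]
    omega

-- outer while loop of A
def outerA (n : Int) (num1 s : Nat) (hp : 0 < num1) : Nat :=
  if h : (num1 : Int) < n then
    outerA n (num1 <<< 1) (innerA n (num1 <<< 1) 1 s one_pos) (by simp [Nat.shiftLeft_eq]; omega)
  else s
  termination_by n.toNat - num1
  decreasing_by
    simp only [Nat.shiftLeft_eq, pow_one]
    omega

def findSumBy2BitsNum (n : Int) : Int := (outerA n 1 0 one_pos : Nat)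

-- ===== PORT B =====
-- Python's int.bit_length() for a nonnegative int (exact on Nat)
def pyBitLength (m : Nat) : Nat :=
  if m = 0 then 0 else pyBitLength (m / 2) + 1
  termination_by m
  decreasing_by omega

-- B's single while loop over the high-bit position i
def altLoop (n : Int) (i total : Nat) : Nat :=
  if h : (((1 <<< i) + 1 : Nat) : Int) ≤ n then
    -- n - (1 << i) is ≥ 1 here, so .toNat is exact for Python's nonnegative int
    let c := min i (pyBitLength (n - ((1 <<< i : Nat) : Int)).toNat)
    altLoop n (i + 1) (total + (c * (1 <<< i) + ((1 <<< c) - 1)))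
  else total
  termination_by n.toNat - i
  decreasing_by
    have h1 : (1 <<< i) = 2 ^ i := Nat.one_shiftLeft i
    have h2 : i < 2 ^ i := Nat.lt_two_pow_self
    rw [h1] at h
    omega

def findSumBy2BitsNum_alt (n : Int) : Int := (altLoop n 1 0 : Nat)

-- ===== PRECONDITION & SPEC =====
def Spec_findSumBy2BitsNum (n : Int) (out : Int) : Prop := out = findSumBy2BitsNum_alt n
instance (n : Int) (out : Int) : Decidable (Spec_findSumBy2BitsNum n out) := by unfold Spec_findSumBy2BitsNum; infer_instance

-- ===== CLAIM (what is proved, stated in full; the proofs are below) =====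
def Claim_equal_findSumBy2BitsNum : Prop := ∀ (n : Int), Dom_findSumBy2BitsNum n → Spec_findSumBy2BitsNum n (findSumBy2BitsNum n)

-- ===== LEMMAS AND PROOFS =====

-- the sum contributed by high bit position i (indicator form); both loops reduce to it
def G (n : Int) (i : Nat) : Nat :=
  ∑ u ∈ Finset.range i, (if ((2 ^ i + 2 ^ u : Nat) : Int) ≤ n then 2 ^ i + 2 ^ u else 0)

theorem or_two_pow (u i : Nat) (h : u < i) : 2 ^ i ||| 2 ^ u = 2 ^ i + 2 ^ u := by
  induction u generalizing i with
  | zero =>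
    obtain ⟨j, rfl⟩ : ∃ j, i = j + 1 := ⟨i - 1, by omega⟩
    have hb : (2 * 2 ^ j) ||| (2 * 0 + 1) = 2 * (2 ^ j ||| 0) + 1 := by
      simpa [Nat.bit] using
        Nat.bitwise_bit (f := Bool.or) (a := false) (m := 2 ^ j) (b := true) (n := 0)
    simpa [pow_succ, Nat.mul_comm] using hb
  | succ u ih =>
    obtain ⟨j, rfl⟩ : ∃ j, i = j + 1 := ⟨i - 1, by omega⟩
    have hb : (2 * 2 ^ j) ||| (2 * 2 ^ u) = 2 * (2 ^ j ||| 2 ^ u) := by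
      simpa [Nat.bit] using
        Nat.bitwise_bit (f := Bool.or) (a := false) (m := 2 ^ j) (b := false) (n := 2 ^ u)
    have hj : 2 ^ j ||| 2 ^ u = 2 ^ j + 2 ^ u := ih j (by omega)
    calc 2 ^ (j + 1) ||| 2 ^ (u + 1) = 2 * (2 ^ j ||| 2 ^ u) := by
          simpa [pow_succ, Nat.mul_comm] using hb
      _ = 2 ^ (j + 1) + 2 ^ (u + 1) := by rw [hj]; ring

theorem innerA_spec (n : Int) (i : Nat) :
    ∀ (d t s : Nat) (hp : 0 < 2 ^ t), i - t = d → t ≤ i →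
      innerA n (2 ^ i) (2 ^ t) s hp =
        s + ∑ u ∈ Finset.Ico t i, (if ((2 ^ i + 2 ^ u : Nat) : Int) ≤ n then 2 ^ i + 2 ^ u else 0) := by
  intro d
  induction d with
  | zero =>
    intro t s hp hd ht
    have : t = i := by omega
    subst this
    rw [innerA]
    simp
  | succ d ih =>
    intro t s hp hd ht
    have hti : t < i := by omega
    have hne : (2 : Nat) ^ i ≠ 2 ^ t := by
      intro hEq
      exact absurd (Nat.pow_right_injective (by norm_num) hEq) (by omega)
    have hor : (2 : Nat) ^ i ||| 2 ^ t = 2 ^ i + 2 ^ t := or_two_pow t i hti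
    rw [innerA]
    by_cases hle : ((2 ^ i + 2 ^ t : Nat) : Int) ≤ n
    · rw [dif_pos ⟨by rw [hor]; exact_mod_cast hle, hne⟩]
      have hsh : (2 : Nat) ^ t <<< 1 = 2 ^ (t + 1) := by
        simp [Nat.shiftLeft_eq, pow_succ]
      rw [hor]
      -- align the recursive call with the induction hypothesis
      have := ih (t + 1) (s + (2 ^ i + 2 ^ t)) (by positivity) (by omega) (by omega)
      rw [Finset.sum_eq_sum_Ico_succ_bot hti, if_pos hle]
      calc innerA n (2 ^ i) (2 ^ t <<< 1) (s + (2 ^ i + 2 ^ t)) _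
          = innerA n (2 ^ i) (2 ^ (t + 1)) (s + (2 ^ i + 2 ^ t)) (by positivity) := by
            congr 1
        _ = s + (2 ^ i + 2 ^ t) +
              ∑ u ∈ Finset.Ico (t + 1) i,
                (if ((2 ^ i + 2 ^ u : Nat) : Int) ≤ n then 2 ^ i + 2 ^ u else 0) := this
        _ = _ := by omega
    · rw [dif_neg (by rw [hor]; tauto)]
      have hz : ∑ u ∈ Finset.Ico t i,
          (if ((2 ^ i + 2 ^ u : Nat) : Int) ≤ n then 2 ^ i + 2 ^ u else 0) = 0 := by
        apply Finset.sum_eq_zero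
        intro u hu
        have htu : (2 : Nat) ^ t ≤ 2 ^ u :=
          Nat.pow_le_pow_right (by norm_num) (Finset.mem_Ico.mp hu).1
        rw [if_neg]
        intro hc
        apply hle
        have : ((2 ^ i + 2 ^ t : Nat) : Int) ≤ ((2 ^ i + 2 ^ u : Nat) : Int) := by
          push_cast; omega
        omega
      omega

theorem outerA_spec (n : Int) (M : Nat) (hn : n ≤ ((2 ^ M : Nat) : Int)) :
    ∀ (k i s : Nat) (hp : 0 < 2 ^ i), M - i = k →
      outerA n (2 ^ i) s hp = s + ∑ i' ∈ Finset.Ico (i + 1) (M + 1), G n i' := by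
  intro k
  induction k with
  | zero =>
    intro i s hp hk
    rw [outerA]
    have hMi : M ≤ i := by omega
    have hle : (2 : Nat) ^ M ≤ 2 ^ i := Nat.pow_le_pow_right (by norm_num) hMi
    have hle' : ((2 ^ M : Nat) : Int) ≤ ((2 ^ i : Nat) : Int) := by exact_mod_cast hle
    rw [dif_neg (by omega)]
    rw [Finset.Ico_eq_empty (by omega)]
    simp
  | succ k ih =>
    intro i s hp hk
    rw [outerA]
    by_cases hg : ((2 ^ i : Nat) : Int) < n
    · rw [dif_pos hg]
      have hiM : i < M := by omega
      have hsh : (2 : Nat) ^ i <<< 1 = 2 ^ (i + 1) := by simp [Nat.shiftLeft_eq, pow_succ]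
      have hinner : innerA n (2 ^ i <<< 1) 1 s one_pos = s + G n (i + 1) := by
        calc innerA n (2 ^ i <<< 1) 1 s one_pos
            = innerA n (2 ^ (i + 1)) (2 ^ 0) s (by positivity) := by congr 1
          _ = s + ∑ u ∈ Finset.Ico 0 (i + 1),
                (if ((2 ^ (i + 1) + 2 ^ u : Nat) : Int) ≤ n then 2 ^ (i + 1) + 2 ^ u else 0) :=
              innerA_spec n (i + 1) (i + 1) 0 s (by positivity) (by omega) (by omega)
          _ = s + G n (i + 1) := by rw [G, Finset.range_eq_Ico]
      have hrec : outerA n (2 ^ i <<< 1) (innerA n (2 ^ i <<< 1) 1 s one_pos)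
          (by rw [hsh]; positivity) =
          innerA n (2 ^ i <<< 1) 1 s one_pos + ∑ i' ∈ Finset.Ico (i + 1 + 1) (M + 1), G n i' := by
        have := ih (i + 1) (innerA n (2 ^ i <<< 1) 1 s one_pos) (by positivity) (by omega)
        calc outerA n (2 ^ i <<< 1) (innerA n (2 ^ i <<< 1) 1 s one_pos) (by rw [hsh]; positivity)
            = outerA n (2 ^ (i + 1)) (innerA n (2 ^ i <<< 1) 1 s one_pos) (by positivity) := by
              congr 1
          _ = _ := this
      rw [hrec, hinner, Finset.sum_eq_sum_Ico_succ_bot (by omega : i + 1 < M + 1)]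
      omega
    · rw [dif_neg hg]
      have hz : ∑ i' ∈ Finset.Ico (i + 1) (M + 1), G n i' = 0 := by
        apply Finset.sum_eq_zero
        intro i' hi'
        have hii' : i + 1 ≤ i' := (Finset.mem_Ico.mp hi').1
        apply Finset.sum_eq_zero
        intro u _
        rw [if_neg]
        intro hc
        have h1 : (2 : Nat) ^ i ≤ 2 ^ i' := Nat.pow_le_pow_right (by norm_num) (by omega)
        have h2 : (1 : Nat) ≤ 2 ^ u := Nat.one_le_two_pow
        have : ((2 ^ i : Nat) : Int) < ((2 ^ i' + 2 ^ u : Nat) : Int) := by push_cast; omega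
        omega
      omega

theorem pyBitLength_spec (m : Nat) : ∀ j, 2 ^ j ≤ m ↔ j < pyBitLength m := by
  induction m using Nat.strong_induction_on with
  | _ m ih =>
    intro j
    rw [pyBitLength]
    by_cases hm : m = 0
    · subst hm
      rw [if_pos rfl]
      have := Nat.two_pow_pos j
      omega
    · rw [if_neg hm]
      cases j with
      | zero => simp [Nat.one_le_iff_ne_zero, hm]
      | succ j =>
        have hdiv : m / 2 < m := by omega
        have := (ih (m / 2) hdiv j)
        constructor
        · intro h
          have : 2 ^ j ≤ m / 2 := by
            rw [Nat.le_div_iff_mul_le (by norm_num)]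
            calc 2 ^ j * 2 = 2 ^ (j + 1) := by ring
              _ ≤ m := h
          omega
        · intro h
          have h2 : 2 ^ j ≤ m / 2 := (ih (m / 2) hdiv j).mpr (by omega)
          calc 2 ^ (j + 1) = 2 ^ j * 2 := by ring
            _ ≤ m / 2 * 2 := by omega
            _ ≤ m := Nat.div_mul_le_self m 2

theorem geom_two (c : Nat) : ∑ u ∈ Finset.range c, 2 ^ u = 2 ^ c - 1 := by
  induction c with
  | zero => simp
  | succ c ih =>
    rw [Finset.sum_range_succ, ih]
    have : (1 : Nat) ≤ 2 ^ c := Nat.one_le_two_pow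
    have : (2 : Nat) ^ (c + 1) = 2 ^ c + 2 ^ c := by ring
    omega

theorem G_closed (n : Int) (i : Nat) (h : ((2 ^ i + 1 : Nat) : Int) ≤ n) :
    G n i = (min i (pyBitLength (n - ((2 ^ i : Nat) : Int)).toNat)) * 2 ^ i +
      (2 ^ (min i (pyBitLength (n - ((2 ^ i : Nat) : Int)).toNat)) - 1) := by
  set m : Nat := (n - ((2 ^ i : Nat) : Int)).toNat with hm
  set c : Nat := min i (pyBitLength m) with hc
  have hind : ∀ u, (((2 ^ i + 2 ^ u : Nat) : Int) ≤ n ↔ u < pyBitLength m) := by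
    intro u
    rw [← pyBitLength_spec m u, hm]
    omega
  have hGi : G n i = ∑ u ∈ Finset.range i, (if u < c then 2 ^ i + 2 ^ u else 0) := by
    rw [G]
    apply Finset.sum_congr rfl
    intro u hu
    have hui := Finset.mem_range.mp hu
    by_cases hcu : u < c
    · rw [if_pos ((hind u).mpr (by omega)), if_pos hcu]
    · rw [if_neg (fun hcon => hcu (by have := (hind u).mp hcon; omega)), if_neg hcu]
  have hfil : (Finset.range i).filter (fun u => u < c) = Finset.range c := by
    apply Finset.ext
    intro u
    simp only [Finset.mem_filter, Finset.mem_range]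
    omega
  rw [hGi, ← Finset.sum_filter, hfil, Finset.sum_add_distrib, Finset.sum_const,
    Finset.card_range, geom_two, smul_eq_mul, mul_comm]

theorem altLoop_spec (n : Int) (M : Nat) (hn : n ≤ ((2 ^ M : Nat) : Int)) :
    ∀ (k i t : Nat), M + 1 - i = k →
      altLoop n i t = t + ∑ i' ∈ Finset.Ico i (M + 1), G n i' := by
  intro k
  induction k with
  | zero =>
    intro i t hk
    rw [altLoop]
    rw [dif_neg]
    · rw [Finset.Ico_eq_empty (by omega)]
      simp
    · intro hg
      rw [Nat.one_shiftLeft] at hg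
      have h1 : (2 : Nat) ^ M ≤ 2 ^ i := Nat.pow_le_pow_right (by norm_num) (by omega)
      have h2 : ((2 ^ M : Nat) : Int) ≤ ((2 ^ i : Nat) : Int) := by exact_mod_cast h1
      omega
  | succ k ih =>
    intro i t hk
    rw [altLoop]
    by_cases hg : (((1 <<< i) + 1 : Nat) : Int) ≤ n
    · rw [dif_pos hg]
      rw [Nat.one_shiftLeft] at hg
      have hiM : i < M := by
        by_contra hcon
        have h1 : (2 : Nat) ^ M ≤ 2 ^ i := Nat.pow_le_pow_right (by norm_num) (by omega)
        have h2 : ((2 ^ M : Nat) : Int) ≤ ((2 ^ i : Nat) : Int) := by exact_mod_cast h1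
        omega
      have hstep := ih (i + 1)
        (t + ((min i (pyBitLength (n - ((1 <<< i : Nat) : Int)).toNat)) * (1 <<< i) +
          ((1 <<< (min i (pyBitLength (n - ((1 <<< i : Nat) : Int)).toNat))) - 1))) (by omega)
      rw [hstep]
      have hG := G_closed n i hg
      rw [Finset.sum_eq_sum_Ico_succ_bot (by omega : i < M + 1), hG]
      simp only [Nat.one_shiftLeft]
      omega
    · rw [dif_neg hg]
      rw [Nat.one_shiftLeft] at hg
      have hz : ∑ i' ∈ Finset.Ico i (M + 1), G n i' = 0 := by
        apply Finset.sum_eq_zero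
        intro i' hi'
        apply Finset.sum_eq_zero
        intro u _
        rw [if_neg]
        intro hc
        have h1 : (2 : Nat) ^ i ≤ 2 ^ i' := Nat.pow_le_pow_right (by norm_num)
          (Finset.mem_Ico.mp hi').1
        have h2 : (1 : Nat) ≤ 2 ^ u := Nat.one_le_two_pow
        have : ((2 ^ i + 1 : Nat) : Int) ≤ ((2 ^ i' + 2 ^ u : Nat) : Int) := by push_cast; omega
        omega
      omega

-- ===== VERDICT (by name: the statement is the Claim_ definition above) =====
theorem findSumBy2BitsNum_spec : Claim_equal_findSumBy2BitsNum := by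
  intro n _
  unfold Spec_findSumBy2BitsNum findSumBy2BitsNum findSumBy2BitsNum_alt
  have hn : n ≤ ((2 ^ n.toNat : Nat) : Int) := by
    have := Nat.lt_two_pow_self (n := n.toNat)
    omega
  have hA : outerA n 1 0 one_pos = 0 + ∑ i' ∈ Finset.Ico 1 (n.toNat + 1), G n i' :=
    outerA_spec n n.toNat hn (n.toNat - 0) 0 0 one_pos rfl
  have hB : altLoop n 1 0 = 0 + ∑ i' ∈ Finset.Ico 1 (n.toNat + 1), G n i' :=
    altLoop_spec n n.toNat hn (n.toNat + 1 - 1) 1 0 rfl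
  exact_mod_cast hA.trans hB.symm
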